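-- pv_equiv track=rewrite | github.com/Dailyalgo-Study/dailyalgo-BBIYAK-study-1 | 현지윤/2주차/05_학점_분배/Solution.py | solution
-- ===== SOURCE A (Python) =====
-- def solution(scores):
--     answer = []
--     n = len(scores)
--     k = n // 3
--
--     def sort_key(i):
--         # 점수는 내림차순, 번호는 오름차순
--         return (-scores[i], i+1)
--
--     order = sorted(range(n), key=sort_key)
--
--     grades = [''] * n # 등급 초기화
--
--     for rank, idx in enumerate(order):
--         if rank < k : #상위 33%.
--             grade = 'A'
--         elif rank < 2 * k:
--             grade = 'B'
--         else:
--             grade = 'C'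
--
--         grades[idx] = grade
--     return grades
-- ===== SOURCE B (Python) =====
-- def solution(scores):
--     n = len(scores)
--     k = n // 3
--     out = []
--     for i, s in enumerate(scores):
--         rank = sum(t > s for t in scores) + scores[:i].count(s)
--         out.append('A' if rank < k else 'B' if rank < 2 * k else 'C')
--     return out
-- ===== Notes on version B (the rewrite author's own statement) =====
-- stated objective: alternative
-- what changed: Replaces A's sort of indices by (-score, index) followed by a rank-ordered write-back into a preallocated grades list with direct counting: each index's rank is computed as the number of strictly greater scores plus the number of earlier equal scores, and grades are emitted in one pass over the input.
import Mathlib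
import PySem

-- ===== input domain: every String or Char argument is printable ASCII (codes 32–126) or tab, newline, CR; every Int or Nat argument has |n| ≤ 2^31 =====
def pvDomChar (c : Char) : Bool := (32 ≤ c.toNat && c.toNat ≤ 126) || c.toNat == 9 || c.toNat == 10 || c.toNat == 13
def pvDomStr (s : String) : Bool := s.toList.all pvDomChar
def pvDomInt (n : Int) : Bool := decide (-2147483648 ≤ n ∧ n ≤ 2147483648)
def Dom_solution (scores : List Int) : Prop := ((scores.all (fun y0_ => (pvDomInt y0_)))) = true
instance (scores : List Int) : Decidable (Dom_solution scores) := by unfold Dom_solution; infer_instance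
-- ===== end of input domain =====

-- B replaces A's sort-by-(-score, index) plus rank write-back with direct counting passes
-- (rank of i = #strictly-greater scores + #earlier equal scores); alternative decomposition, not faster.

-- ===== PORT A =====
def solution (scores : List Int) : List String :=
  let n : Int := PySem.List.len scores
  let k : Int := PySem.Int.floordiv n 3
  let order : List Int :=
    PySem.List.sorted2 (PySem.List.pyRange 0 n)
      (fun i => -(PySem.List.pyGetD scores i 0)) (fun i => i + 1)
  let grades : List String := List.replicate scores.length ""
  (PySem.List.enumerate order 0).foldl
    (fun grades p =>
      PySem.List.pySetD grades p.2
        (if p.1 < k then "A" else if p.1 < 2 * k then "B" else "C"))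
    grades

-- ===== PORT B =====
def solution_alt (scores : List Int) : List String :=
  let n : Int := PySem.List.len scores
  let k : Int := PySem.Int.floordiv n 3
  (PySem.List.enumerate scores 0).foldl
    (fun out p =>
      let rank : Int :=
        (scores.map (fun t => if p.2 < t then (1 : Int) else 0)).sum
          + (PySem.List.count (PySem.List.slice scores none (some p.1)) p.2 : Int)
      out ++ [if rank < k then "A" else if rank < 2 * k then "B" else "C"])
    []

-- ===== PRECONDITION & SPEC =====
def Spec_solution (scores : List Int) (out : List String) : Prop := out = solution_alt scores
instance (scores : List Int) (out : List String) : Decidable (Spec_solution scores out) := by unfold Spec_solution; infer_instance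

-- ===== CLAIM (what is proved, stated in full; the proofs are below) =====
def Claim_equal_solution : Prop := ∀ (scores : List Int), Dom_solution scores → Spec_solution scores (solution scores)

-- ===== LEMMAS AND PROOFS =====

-- the strict lexicographic comparator sorted2 uses for A's key (-scores[i], i+1)
def pvLt (scores : List Int) (a b : Int) : Bool :=
  decide (-(PySem.List.pyGetD scores a 0) < -(PySem.List.pyGetD scores b 0)) ||
    (!decide (-(PySem.List.pyGetD scores b 0) < -(PySem.List.pyGetD scores a 0)) &&
      decide (a + 1 < b + 1))

def pvGrade (k r : Int) : String := if r < k then "A" else if r < 2 * k then "B" else "C"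

lemma pvLt_asymm (s : List Int) (a b : Int) (h : pvLt s a b = true) : pvLt s b a = false := by
  simp only [pvLt, Bool.or_eq_true, Bool.and_eq_true, Bool.not_eq_eq_eq_not, Bool.not_true,
    Bool.not_false, decide_eq_true_eq, decide_eq_false_iff_not, Bool.or_eq_false_iff,
    Bool.and_eq_false_iff] at *
  omega

lemma pvLt_trans (s : List Int) (a b c : Int) (h1 : pvLt s a b = true) (h2 : pvLt s b c = true) :
    pvLt s a c = true := by
  simp only [pvLt, Bool.or_eq_true, Bool.and_eq_true, Bool.not_eq_eq_eq_not, Bool.not_true,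
    Bool.not_false, decide_eq_true_eq, decide_eq_false_iff_not, Bool.or_eq_false_iff,
    Bool.and_eq_false_iff] at *
  omega

lemma pvLt_total (s : List Int) (a b : Int) (h : a ≠ b) :
    pvLt s a b = true ∨ pvLt s b a = true := by
  simp only [pvLt, Bool.or_eq_true, Bool.and_eq_true, Bool.not_eq_eq_eq_not, Bool.not_true,
    Bool.not_false, decide_eq_true_eq, decide_eq_false_iff_not, Bool.or_eq_false_iff,
    Bool.and_eq_false_iff]
  omega

-- insertion keeps the "no inversion" invariant of insertion sort
lemma pv_pairwise_insertBy {α : Type} (before : α → α → Bool)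
    (hasym : ∀ a b, before a b = true → before b a = false)
    (htrans : ∀ a b c, before a b = true → before b c = true → before a c = true)
    (x : α) (ys : List α) (h : ys.Pairwise (fun a b => before b a = false)) :
    (PySem.List.insertBy before x ys).Pairwise (fun a b => before b a = false) := by
  induction ys with
  | nil => simp [PySem.List.insertBy]
  | cons y ys ih =>
    rcases List.pairwise_cons.mp h with ⟨hy, hys⟩
    by_cases hxy : before x y = true
    · simp only [PySem.List.insertBy, hxy, if_pos]
      refine List.pairwise_cons.mpr ⟨?_, h⟩
      intro z hz
      rcases List.mem_cons.mp hz with rfl | hz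
      · exact hasym _ _ hxy
      · by_cases hzx : before z x = true
        · have := htrans _ _ _ hzx hxy
          rw [hy z hz] at this; exact absurd this (by simp)
        · simpa using hzx
    · simp only [PySem.List.insertBy, hxy, if_neg, Bool.false_eq_true, not_false_iff]
      refine List.pairwise_cons.mpr ⟨?_, ih hys⟩
      intro z hz
      rcases (PySem.List.mem_insertBy before x z ys).mp hz with rfl | hz
      · simpa using hxy
      · exact hy z hz

lemma pv_pairwise_foldl {α : Type} (before : α → α → Bool)
    (hasym : ∀ a b, before a b = true → before b a = false)
    (htrans : ∀ a b c, before a b = true → before b c = true → before a c = true)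
    (xs : List α) :
    ∀ acc : List α, acc.Pairwise (fun a b => before b a = false) →
      (xs.foldl (fun acc x => PySem.List.insertBy before x acc) acc).Pairwise
        (fun a b => before b a = false) := by
  induction xs with
  | nil => intro acc h; simpa using h
  | cons x xs ih =>
    intro acc h
    exact ih _ (pv_pairwise_insertBy before hasym htrans x acc h)

-- position of an element in a strictly ordered list = number of elements below it
lemma pv_index_eq_countP (ltR : Int → Int → Bool)
    (hasym : ∀ a b, ltR a b = true → ltR b a = false) :
    ∀ (L : List Int), L.Pairwise (fun a b => ltR a b = true) → ∀ m ∈ L,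
      PySem.List.index? L m = some (L.countP (fun j => ltR j m)) := by
  intro L
  induction L with
  | nil => intro _ m hm; cases hm
  | cons x t ih =>
    intro hp m hm
    rcases List.pairwise_cons.mp hp with ⟨hx, ht⟩
    by_cases hxm : x = m
    · subst hxm
      have h0 : (x :: t).countP (fun j => ltR j x) = 0 := by
        rw [List.countP_eq_zero]
        intro j hj
        rcases List.mem_cons.mp hj with rfl | hj
        · by_cases h : ltR j j = true
          · rw [hasym _ _ h] at h; simp at h
          · simpa using h
        · simpa using hasym _ _ (hx j hj)
      rw [h0]
      exact PySem.List.index?_cons_self x t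

    · have hmt : m ∈ t := by
        rcases List.mem_cons.mp hm with rfl | h
        · exact absurd rfl hxm
        · exact h
      rw [PySem.List.index?_cons_of_ne t hxm, ih ht m hmt]
      have hxlt : ltR x m = true := hx m hmt
      simp [List.countP_cons, hxlt]

-- (range n) mapped through getD is the list itself / its prefix
lemma pv_map_getD_range (xs : List Int) (d : Int) :
    (List.range xs.length).map (fun j => xs.getD j d) = xs := by
  apply List.ext_getElem
  · simp
  · intro i h1 h2
    simp [List.getD_eq_getElem?_getD, List.getElem?_eq_getElem h2]

lemma pv_map_getD_range_take (xs : List Int) (d : Int) (m : Nat) (hm : m ≤ xs.length) :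
    (List.range m).map (fun j => xs.getD j d) = xs.take m := by
  apply List.ext_getElem
  · simp [hm]
  · intro i h1 h2
    have hi : i < xs.length := lt_of_lt_of_le (by simpa [hm] using h1) hm
    simp [List.getD_eq_getElem?_getD, List.getElem?_eq_getElem hi,
      List.getElem_take]

lemma pv_countP_disjoint {α : Type} (l : List α) (p q : α → Bool)
    (h : ∀ x ∈ l, ¬(p x = true ∧ q x = true)) :
    l.countP (fun x => p x || q x) = l.countP p + l.countP q := by
  induction l with
  | nil => simp
  | cons x t ih =>
    have hx := h x List.mem_cons_self
    have ht := ih (fun y hy => h y (List.mem_cons_of_mem x hy))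
    rw [List.countP_cons, List.countP_cons, List.countP_cons, ht]
    by_cases hp : p x = true <;> by_cases hq : q x = true
    · exact absurd ⟨hp, hq⟩ hx
    · simp [hp, hq]; omega
    · simp [hp, hq]; omega
    · simp [hp, hq]

-- the counting characterisation of A's rank of index m
lemma pv_countP_range (scores : List Int) (m : Nat) (hm : m < scores.length) :
    (List.range scores.length).countP (fun j : Nat => pvLt scores (j : Int) (m : Int)) =
      scores.countP (fun t => decide (scores.getD m 0 < t)) +
        (scores.take m).countP (fun t => t == scores.getD m 0) := by
  set s := scores.getD m 0 with hs
  have hpt : ∀ j ∈ List.range scores.length,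
      (pvLt scores (j : Int) (m : Int) = true) ↔
        ((decide (s < scores.getD j 0) || (decide (scores.getD j 0 = s) && decide (j < m))) = true) := by
    intro j hj
    have hj' : j < scores.length := List.mem_range.mp hj
    have g1 : PySem.List.pyGetD scores (j : Int) 0 = scores.getD j 0 := by
      rw [PySem.List.pyGetD_eq_getElem scores 0 (by positivity) (by exact_mod_cast hj')]
      simp [List.getD_eq_getElem?_getD, List.getElem?_eq_getElem hj']
    have g2 : PySem.List.pyGetD scores (m : Int) 0 = s := by
      rw [PySem.List.pyGetD_eq_getElem scores 0 (by positivity) (by exact_mod_cast hm)]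
      simp [hs, List.getD_eq_getElem?_getD, List.getElem?_eq_getElem hm]
    simp only [pvLt, g1, g2, Bool.or_eq_true, Bool.and_eq_true, Bool.not_eq_eq_eq_not,
      Bool.not_true, Bool.not_false, decide_eq_true_eq, decide_eq_false_iff_not]
    omega
  rw [List.countP_congr hpt]
  rw [pv_countP_disjoint (List.range scores.length) (fun j : Nat => decide (s < scores.getD j 0))
    (fun j : Nat => decide (scores.getD j 0 = s) && decide (j < m))
    (by intro x _; intro ⟨h1, h2⟩; simp at h1 h2; omega)]
  congr 1
  · have := pv_map_getD_range scores 0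
    calc (List.range scores.length).countP (fun j => decide (s < scores.getD j 0))
        = ((List.range scores.length).map (fun j => scores.getD j 0)).countP
            (fun t => decide (s < t)) := by rw [List.countP_map]; rfl
      _ = scores.countP (fun t => decide (s < t)) := by rw [this]
  · have hsplit : List.range scores.length =
        List.range m ++ (List.range (scores.length - m)).map (fun x => m + x) := by
      rw [← List.range_add]; congr 1; omega
    rw [hsplit, List.countP_append]
    have h2 : ((List.range (scores.length - m)).map (fun x => m + x)).countP
        (fun j => decide (scores.getD j 0 = s) && decide (j < m)) = 0 := by
      rw [List.countP_eq_zero]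
      intro j hj
      rcases List.mem_map.mp hj with ⟨x, _, rfl⟩
      simp
    rw [h2, Nat.add_zero]
    calc (List.range m).countP (fun j => decide (scores.getD j 0 = s) && decide (j < m))
        = (List.range m).countP (fun j => decide (scores.getD j 0 = s)) := by
          apply List.countP_congr; intro j hj
          have := List.mem_range.mp hj
          simp [this]
      _ = ((List.range m).map (fun j => scores.getD j 0)).countP
            (fun t => t == s) := by
          rw [List.countP_map]
          apply List.countP_congr
          intro j hj
          simp [Function.comp]
      _ = (scores.take m).countP (fun t => t == s) := by
          rw [pv_map_getD_range_take scores 0 m (le_of_lt hm)]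

-- A's write-back loop, characterised pointwise
lemma pv_fold_set (k : Int) :
    ∀ (L : List Int) (st : Int) (g : List String), L.Nodup →
      (∀ x ∈ L, 0 ≤ x ∧ x < (g.length : Int)) →
      ∀ (m : Nat), m < g.length →
        ((PySem.List.enumerate L st).foldl
            (fun g p => PySem.List.pySetD g p.2 (pvGrade k p.1)) g)[m]? =
          (match PySem.List.index? L (m : Int) with
            | some p => some (pvGrade k (st + p))
            | none => g[m]?) := by
  intro L
  induction L with
  | nil => intro st g _ _ m hm; simp [PySem.List.enumerate, PySem.List.index?]
  | cons x t ih =>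
    intro st g hnd hrange m hm
    rcases List.nodup_cons.mp hnd with ⟨hxt, hndt⟩
    rcases hrange x List.mem_cons_self with ⟨hx0, hxlen⟩
    have hset : PySem.List.pySetD g x (pvGrade k st) = g.set x.toNat (pvGrade k st) :=
      PySem.List.pySetD_of_nonneg g _ hx0
    have hlen' : (PySem.List.pySetD g x (pvGrade k st)).length = g.length :=
      PySem.List.length_pySetD g x _
    rw [PySem.List.enumerate_cons, List.foldl_cons]
    rw [ih (st + 1) _ hndt (by intro y hy; rw [hlen']; exact hrange y (List.mem_cons_of_mem x hy))
        m (by rw [hlen']; exact hm)]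
    by_cases hxm : x = (m : Int)
    · rw [← hxm]
      have hnotin : PySem.List.index? t x = none := by
        rw [PySem.List.index?_eq_none_iff]; exact hxt
      rw [hnotin, PySem.List.index?_cons_self]
      simp only [hset]
      have hxt' : x.toNat = m := by omega
      rw [hxt']
      simp [List.getElem?_set_self, hm]
    · rw [PySem.List.index?_cons_of_ne t hxm]
      have hgm : (PySem.List.pySetD g x (pvGrade k st))[m]? = g[m]? := by
        rw [hset]
        have : x.toNat ≠ m := by omega
        rw [List.getElem?_set_ne this]
      cases hidx : PySem.List.index? t (m : Int) with
      | none => simp [hgm]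
      | some p =>
        simp only [Option.map_some]
        have : st + 1 + (p : Int) = st + ((p : Int) + 1) := by ring
        simp [this]

lemma pv_fold_set_length (k : Int) :
    ∀ (ps : List (Int × Int)) (g : List String),
      (ps.foldl (fun g p => PySem.List.pySetD g p.2 (pvGrade k p.1)) g).length = g.length := by
  intro ps
  induction ps with
  | nil => intro g; rfl
  | cons p ps ih => intro g; rw [List.foldl_cons, ih, PySem.List.length_pySetD]

-- order is strictly pvLt-increasing and a permutation of range n
lemma pv_order_perm (scores : List Int) :
    (PySem.List.sorted2 (PySem.List.pyRange 0 (PySem.List.len scores))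
      (fun i => -(PySem.List.pyGetD scores i 0)) (fun i => i + 1)).Perm
      (PySem.List.pyRange 0 (PySem.List.len scores)) :=
  PySem.List.sorted2_perm _ _ _ _

lemma pv_order_eq_foldl (scores : List Int) :
    PySem.List.sorted2 (PySem.List.pyRange 0 (PySem.List.len scores))
      (fun i => -(PySem.List.pyGetD scores i 0)) (fun i => i + 1) =
    (PySem.List.pyRange 0 (PySem.List.len scores)).foldl
      (fun acc x => PySem.List.insertBy (pvLt scores) x acc) [] := rfl

lemma pv_order_pairwise (scores : List Int) :
    (PySem.List.sorted2 (PySem.List.pyRange 0 (PySem.List.len scores))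
      (fun i => -(PySem.List.pyGetD scores i 0)) (fun i => i + 1)).Pairwise
      (fun a b => pvLt scores a b = true) := by
  have hnle : (PySem.List.sorted2 (PySem.List.pyRange 0 (PySem.List.len scores))
      (fun i => -(PySem.List.pyGetD scores i 0)) (fun i => i + 1)).Pairwise
      (fun a b => pvLt scores b a = false) := by
    rw [pv_order_eq_foldl]
    exact pv_pairwise_foldl (pvLt scores) (pvLt_asymm scores) (pvLt_trans scores) _ [] (by simp)
  have hnd : (PySem.List.sorted2 (PySem.List.pyRange 0 (PySem.List.len scores))
      (fun i => -(PySem.List.pyGetD scores i 0)) (fun i => i + 1)).Nodup :=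
    (pv_order_perm scores).nodup_iff.mpr (PySem.List.nodup_pyRange_one _ _)
  have := List.Pairwise.and hnd hnle
  apply this.imp
  intro a b ⟨hne, hnlt⟩
  rcases pvLt_total scores a b hne with h | h
  · exact h
  · rw [h] at hnlt
    exact absurd hnlt (by simp)

lemma pv_getD_eq (scores : List Int) (m : Nat) (hm : m < scores.length) :
    scores.getD m 0 = scores[m] := by
  simp [List.getD_eq_getElem?_getD, List.getElem?_eq_getElem hm]

-- ===== VERDICT (by name: the statement is the Claim_ definition above) =====
theorem solution_spec : Claim_equal_solution := by
  intro scores _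
  show solution scores = solution_alt scores
  have hlen := PySem.List.len_eq scores
  have hA : solution scores =
      (PySem.List.enumerate
          (PySem.List.sorted2 (PySem.List.pyRange 0 (PySem.List.len scores))
            (fun i => -(PySem.List.pyGetD scores i 0)) (fun i => i + 1)) 0).foldl
        (fun g p => PySem.List.pySetD g p.2
          (pvGrade (PySem.Int.floordiv (PySem.List.len scores) 3) p.1))
        (List.replicate scores.length "") := rfl
  have hB : solution_alt scores =
      (PySem.List.enumerate scores 0).map
        (fun p : Int × Int =>
          pvGrade (PySem.Int.floordiv (PySem.List.len scores) 3)
            ((scores.map (fun t => if p.2 < t then (1 : Int) else 0)).sum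
              + (PySem.List.count (PySem.List.slice scores none (some p.1)) p.2 : Int))) := by
    have h0 : solution_alt scores =
        (PySem.List.enumerate scores 0).foldl
          (fun out p => out ++ [pvGrade (PySem.Int.floordiv (PySem.List.len scores) 3)
            ((scores.map (fun t => if p.2 < t then (1 : Int) else 0)).sum
              + (PySem.List.count (PySem.List.slice scores none (some p.1)) p.2 : Int))]) [] := rfl
    rw [h0, PySem.List.foldl_append_singleton_eq_map]
    rw [List.nil_append]
  rw [hA, hB]
  have hperm := pv_order_perm scores
  have hmemL : ∀ x, x ∈ (PySem.List.sorted2 (PySem.List.pyRange 0 (PySem.List.len scores))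
      (fun i => -(PySem.List.pyGetD scores i 0)) (fun i => i + 1)) ↔
      0 ≤ x ∧ x < (scores.length : Int) := by
    intro x
    rw [hperm.mem_iff, hlen, PySem.List.mem_pyRange_one]
  have hnodup : (PySem.List.sorted2 (PySem.List.pyRange 0 (PySem.List.len scores))
      (fun i => -(PySem.List.pyGetD scores i 0)) (fun i => i + 1)).Nodup :=
    hperm.nodup_iff.mpr (PySem.List.nodup_pyRange_one _ _)
  apply List.ext_getElem?
  intro m
  by_cases hm : m < scores.length
  · -- in range
    have hgd : scores.getD m 0 = scores[m] := pv_getD_eq scores m hm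
    have hmem : ((m : Nat) : Int) ∈ (PySem.List.sorted2 (PySem.List.pyRange 0 (PySem.List.len scores))
        (fun i => -(PySem.List.pyGetD scores i 0)) (fun i => i + 1)) :=
      (hmemL _).mpr ⟨by positivity, by exact_mod_cast hm⟩
    have hidx := pv_index_eq_countP (pvLt scores) (pvLt_asymm scores) _
      (pv_order_pairwise scores) ((m : Nat) : Int) hmem
    have hcnt : (PySem.List.sorted2 (PySem.List.pyRange 0 (PySem.List.len scores))
        (fun i => -(PySem.List.pyGetD scores i 0)) (fun i => i + 1)).countP
          (fun j => pvLt scores j ((m : Nat) : Int)) =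
        scores.countP (fun t => decide (scores.getD m 0 < t)) +
          (scores.take m).countP (fun t => t == scores.getD m 0) := by
      rw [hperm.countP_eq, hlen, PySem.List.pyRange_zero_nat, List.countP_map]
      exact pv_countP_range scores m hm
    have hL := pv_fold_set (PySem.Int.floordiv (PySem.List.len scores) 3) _ 0
      (List.replicate scores.length "") hnodup
      (by
        intro x hx
        rcases (hmemL x).mp hx with ⟨h0, h1⟩
        constructor
        · exact h0
        · simpa using h1)
      m (by simpa using hm)
    rw [hL, hidx, hcnt]
    have henumlen : m < (PySem.List.enumerate scores 0).length := by
      simpa [PySem.List.length_enumerate] using hm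
    rw [List.getElem?_map, List.getElem?_eq_getElem henumlen,
      PySem.List.getElem_enumerate scores 0 m henumlen]
    simp only [Option.map_some, Option.some.injEq, zero_add]
    have hsum : (scores.map (fun t => if scores[m] < t then (1 : Int) else 0)).sum
        = ((scores.countP (fun t => decide (scores[m] < t)) : Nat) : Int) := by
      have := PySem.List.sum_map_ite_one_zero (fun t => decide (scores[m] < t)) scores
      simpa using this
    have hslice : PySem.List.slice scores none (some ((m : Nat) : Int)) = scores.take m := by
      rw [PySem.List.slice_to scores (by positivity)]
      simp
    have hcount : (PySem.List.count (scores.take m) scores[m] : Nat) =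
        (scores.take m).countP (fun t => t == scores[m]) := by
      rw [PySem.List.count_eq]
      rfl
    rw [hslice, hsum, hcount, hgd]
    push_cast
    ring_nf
  · -- out of range: both sides none
    have hm' : scores.length ≤ m := Nat.le_of_not_lt hm
    rw [List.getElem?_eq_none, List.getElem?_eq_none]
    · simp [PySem.List.length_enumerate]
      omega
    · rw [pv_fold_set_length]
      simpa using hm'
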